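-- pv_equiv track=rewrite | github.com/doakey3/Subsimport | funcs.py | find_even_split
-- ===== SOURCE A (Python) =====
-- def find_even_split(word_list):
--     """
--     Given a list of words, attempts to split the word list
--     into 2 evenly sized strings
--     """
--     differences = []
--     for i in range(len(word_list)):
--         group1 = ' '.join(word_list[0:i+1])
--         group2 = ' '.join(word_list[i+1::])
--         differences.append(abs(len(group1) - len(group2)))
--     index = differences.index(min(differences))
--     for i in range(len(word_list)):
--         if i == index:
--             group1 = ' '.join(word_list[0:i+1])
--             group2 = ' '.join(word_list[i+1::])
--     return group1, group2
-- ===== SOURCE B (Python) =====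
-- def find_even_split(word_list):
--     """
--     Given a list of words, attempts to split the word list
--     into 2 evenly sized strings
--     """
--     n = len(word_list)
--     total = sum(len(w) for w in word_list)
--     diffs = []
--     left = 0
--     for i, w in enumerate(word_list):
--         left += len(w)
--         len1 = left + i
--         len2 = total - left + (n - i - 2 if i + 1 < n else 0)
--         diffs.append(abs(len1 - len2))
--     index = diffs.index(min(diffs))
--     return ' '.join(word_list[:index + 1]), ' '.join(word_list[index + 1:])
-- ===== Notes on version B (the rewrite author's own statement) =====
-- stated objective: faster
-- what changed: Replaces A's per-index rebuild of both joined strings (and its redundant second scan loop) with a single prefix-sum pass over word lengths to locate the min-difference split index, joining only once at the end.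
import Mathlib
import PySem

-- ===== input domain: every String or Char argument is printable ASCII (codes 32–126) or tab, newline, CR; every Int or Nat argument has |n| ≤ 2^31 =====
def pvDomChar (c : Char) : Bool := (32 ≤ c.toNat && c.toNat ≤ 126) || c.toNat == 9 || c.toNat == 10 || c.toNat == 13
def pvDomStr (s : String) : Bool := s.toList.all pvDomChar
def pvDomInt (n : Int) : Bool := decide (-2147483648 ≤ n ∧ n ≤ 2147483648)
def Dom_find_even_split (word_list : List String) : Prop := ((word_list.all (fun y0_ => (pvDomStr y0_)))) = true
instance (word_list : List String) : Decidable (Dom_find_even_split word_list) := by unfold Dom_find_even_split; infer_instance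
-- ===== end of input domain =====

-- B replaces A's quadratic rebuild-both-joins-per-index scan by one prefix-sum pass over word
-- lengths (objective: faster, O(n^2) → O(n) in total string length), then joins once.

-- ===== PORT A =====
def find_even_split (word_list : List String) : String × String :=
  let n : Int := PySem.List.len word_list
  let st1 := (PySem.List.pyRange 0 n 1).foldl
    (fun (st : List Int × String × String) i =>
      let group1 := PySem.Str.join " " (PySem.List.slice word_list (some 0) (some (i + 1)))
      let group2 := PySem.Str.join " " (PySem.List.slice word_list (some (i + 1)) none)
      (st.1 ++ [|PySem.Str.len group1 - PySem.Str.len group2|], group1, group2))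
    ([], "", "")
  let differences := st1.1
  match PySem.List.min? differences (fun x => x) with
  | none => ("", "")   -- min([]) raises ValueError here; excluded by Pre_
  | some m =>
    let index : Nat := (PySem.List.index? differences m).getD 0
    (PySem.List.pyRange 0 n 1).foldl
      (fun (st : String × String) i =>
        if i = (index : Int) then
          (PySem.Str.join " " (PySem.List.slice word_list (some 0) (some (i + 1))),
           PySem.Str.join " " (PySem.List.slice word_list (some (i + 1)) none))
        else st)
      st1.2

-- ===== PORT B =====
def find_even_split_alt (word_list : List String) : String × String :=
  let n : Int := PySem.List.len word_list
  let total : Int := (word_list.map (fun w => PySem.Str.len w)).sum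
  let st := (PySem.List.enumerate word_list 0).foldl
    (fun (st : List Int × Int) p =>
      let left := st.2 + PySem.Str.len p.2
      let len1 := left + p.1
      let len2 := total - left + (if p.1 + 1 < n then n - p.1 - 2 else 0)
      (st.1 ++ [|len1 - len2|], left))
    ([], 0)
  let diffs := st.1
  match PySem.List.min? diffs (fun x => x) with
  | none => ("", "")   -- min([]) raises ValueError here; excluded by Pre_
  | some m =>
    let index : Nat := (PySem.List.index? diffs m).getD 0
    (PySem.Str.join " " (PySem.List.slice word_list none (some ((index : Int) + 1))),
     PySem.Str.join " " (PySem.List.slice word_list (some ((index : Int) + 1)) none))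

-- ===== PRECONDITION & SPEC =====
-- Pre_ excludes only the empty list, on which both A and B raise ValueError (min of an empty sequence).
def Pre_find_even_split (word_list : List String) : Prop := word_list ≠ []
instance (word_list : List String) : Decidable (Pre_find_even_split word_list) := by
  unfold Pre_find_even_split; infer_instance
def pvWitness_find_even_split : List String := ["hello", "big", "world"]

def Spec_find_even_split (word_list : List String) (out : String × String) : Prop :=
  out = find_even_split_alt word_list
instance (word_list : List String) (out : String × String) : Decidable (Spec_find_even_split word_list out) := by
  unfold Spec_find_even_split; infer_instance

-- ===== CLAIM (what is proved, stated in full; the proofs are below) =====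
def Claim_equal_find_even_split : Prop := ∀ (word_list : List String),
  Dom_find_even_split word_list → Pre_find_even_split word_list →
  Spec_find_even_split word_list (find_even_split word_list)

-- ===== LEMMAS AND PROOFS =====

theorem pvLenJoinChars (xs : List (List Char)) (h : xs ≠ []) :
    (PySem.Chars.join [' '] xs).length
      = (xs.map List.length).sum + xs.length - 1 := by
  induction xs with
  | nil => simp at h
  | cons x t ih =>
    cases t with
    | nil => simp [PySem.Chars.join_singleton]
    | cons y t' =>
      rw [PySem.Chars.join_cons_cons]
      have hih := ih (by simp)
      simp [hih]
      omega

theorem pvSumLen (xs : List String) :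
    (xs.map PySem.Str.len).sum = ((xs.map String.length).sum : Nat) := by
  induction xs with
  | nil => simp
  | cons a t ih =>
    simp only [List.map_cons, List.sum_cons, PySem.Str.len_eq, ih, String.length_toList]
    push_cast
    ring

theorem pvLenJoin (xs : List String) (h : xs ≠ []) :
    PySem.Str.len (PySem.Str.join " " xs)
      = (((xs.map String.length).sum + xs.length - 1 : Nat) : Int) := by
  have hc := pvLenJoinChars (xs.map String.toList) (by simpa using h)
  rw [PySem.Str.len_eq, PySem.Str.toList_join]
  have hsp : " ".toList = [' '] := by decide
  rw [hsp, hc]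
  simp [List.map_map, Function.comp_def, String.length_toList]

theorem pvFoldIfNe (k : Int) (F : Int → String × String) (l : List Int)
    (hne : ∀ i ∈ l, i ≠ k) (init : String × String) :
    l.foldl (fun (st : String × String) i => if i = k then F i else st) init = init := by
  induction l generalizing init with
  | nil => rfl
  | cons a t ih =>
    have ha : a ≠ k := hne a (by simp)
    simp only [List.foldl_cons, if_neg ha]
    exact ih (fun i hi => hne i (by simp [hi])) init

theorem pvFoldSet (n : Int) (k : Nat) (hk : (k : Int) < n) (F : Int → String × String)
    (init : String × String) :
    (PySem.List.pyRange 0 n 1).foldl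
      (fun (st : String × String) i => if i = (k : Int) then F i else st) init = F k := by
  rw [PySem.List.pyRange_one_append 0 (k : Int) n (by positivity) (le_of_lt hk),
    PySem.List.pyRange_one_cons hk, List.foldl_append, List.foldl_cons]
  rw [pvFoldIfNe _ _ _ (fun i hi => by have := (PySem.List.mem_pyRange_one.mp hi).1; omega)]
  rw [if_pos rfl]

theorem pvFoldAGen (ws : List String) (l : List Int) (acc : List Int) (g : String × String) :
    (l.foldl
      (fun (st : List Int × String × String) i =>
        let group1 := PySem.Str.join " " (PySem.List.slice ws (some 0) (some (i + 1)))
        let group2 := PySem.Str.join " " (PySem.List.slice ws (some (i + 1)) none)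
        (st.1 ++ [|PySem.Str.len group1 - PySem.Str.len group2|], group1, group2))
      (acc, g)).1
    = acc ++ l.map (fun i =>
        |PySem.Str.len (PySem.Str.join " " (PySem.List.slice ws (some 0) (some (i + 1))))
          - PySem.Str.len (PySem.Str.join " " (PySem.List.slice ws (some (i + 1)) none))|) := by
  induction l generalizing acc g with
  | nil => simp
  | cons a t ih =>
    rw [List.foldl_cons]
    dsimp only
    rw [ih]
    simp

def pvD (ws : List String) (k : Nat) : Int :=
  |PySem.Str.len (PySem.Str.join " " (ws.take (k+1)))
    - PySem.Str.len (PySem.Str.join " " (ws.drop (k+1)))|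

theorem pvFoldA (ws : List String) :
    ((PySem.List.pyRange 0 (PySem.List.len ws) 1).foldl
      (fun (st : List Int × String × String) i =>
        let group1 := PySem.Str.join " " (PySem.List.slice ws (some 0) (some (i + 1)))
        let group2 := PySem.Str.join " " (PySem.List.slice ws (some (i + 1)) none)
        (st.1 ++ [|PySem.Str.len group1 - PySem.Str.len group2|], group1, group2))
      ([], "", "")).1
    = (List.range ws.length).map (pvD ws) := by
  rw [pvFoldAGen ws _ [] ("", "")]
  rw [PySem.List.len_eq, PySem.List.pyRange_zero_nat, List.map_map]
  simp only [List.nil_append]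
  apply List.map_congr_left
  intro k hk
  simp only [Function.comp]
  rw [PySem.List.slice_zero_start, PySem.List.slice_to ws (by positivity),
    PySem.List.slice_from ws (by positivity)]
  have h1 : ((k : Int) + 1).toNat = k + 1 := by omega
  rw [h1]
  rfl

def pvLsum (xs : List String) : Int := (xs.map PySem.Str.len).sum

def pvDBg (total n i left : Int) : Int :=
  |(left + i) - (total - left + (if i + 1 < n then n - i - 2 else 0))|

theorem pvLsum_append_singleton (pre : List String) (w : String) :
    pvLsum (pre ++ [w]) = pvLsum pre + PySem.Str.len w := by
  simp [pvLsum]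

theorem pvFoldBGen (total n : Int) (t : List String) (pre : List String) (acc : List Int) :
    ((PySem.List.enumerate t (pre.length : Int)).foldl
      (fun (st : List Int × Int) p =>
        let left := st.2 + PySem.Str.len p.2
        let len1 := left + p.1
        let len2 := total - left + (if p.1 + 1 < n then n - p.1 - 2 else 0)
        (st.1 ++ [|len1 - len2|], left))
      (acc, pvLsum pre)).1
    = acc ++ (List.range t.length).map
        (fun j : Nat => pvDBg total n ((pre.length + j : Nat)) (pvLsum (pre ++ t.take (j+1)))) := by
  induction t generalizing pre acc with
  | nil => simp
  | cons w t' ih =>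
    rw [PySem.List.enumerate_cons, List.foldl_cons]
    dsimp only
    have hstep : pvLsum pre + PySem.Str.len w = pvLsum (pre ++ [w]) :=
      (pvLsum_append_singleton pre w).symm
    rw [hstep]
    have hidx : (pre.length : Int) + 1 = ((pre ++ [w]).length : Int) := by simp
    rw [hidx, ih (pre ++ [w])]
    simp only [List.length_cons, List.range_succ_eq_map, List.map_cons, List.map_map,
      List.take_succ_cons, List.take_zero, Nat.add_zero, List.append_assoc, List.singleton_append]
    congr 1
    congr 1
    · simp [pvDBg]
    · apply List.map_congr_left
      intro j hj
      congr 1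
      · simp only [List.length_append, List.length_singleton]
        push_cast; ring

def pvDB (ws : List String) (i : Int) (left : Int) : Int :=
  pvDBg (pvLsum ws) ((ws.length : Int)) i left

theorem pvFoldB (ws : List String) :
    ((PySem.List.enumerate ws 0).foldl
      (fun (st : List Int × Int) p =>
        let left := st.2 + PySem.Str.len p.2
        let len1 := left + p.1
        let len2 := (ws.map (fun w => PySem.Str.len w)).sum - left
          + (if p.1 + 1 < PySem.List.len ws then PySem.List.len ws - p.1 - 2 else 0)
        (st.1 ++ [|len1 - len2|], left))
      ([], 0)).1
    = (List.range ws.length).map (fun k : Nat => pvDB ws (k : Int) (pvLsum (ws.take (k+1)))) := by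
  have h := pvFoldBGen ((ws.map (fun w => PySem.Str.len w)).sum) (PySem.List.len ws) ws [] []
  simp only [List.length_nil, Nat.cast_zero] at h
  have h0 : pvLsum ([] : List String) = 0 := rfl
  rw [h0] at h
  rw [h]
  simp only [List.nil_append]
  apply List.map_congr_left
  intro k hk
  simp only [Nat.zero_add, PySem.List.len_eq, pvDB, pvDBg, pvLsum]

theorem pvJoinEmpty : PySem.Str.len (PySem.Str.join " " []) = 0 := by
  rw [PySem.Str.len_eq, PySem.Str.toList_join]
  simp [PySem.Chars.join_nil]

theorem pvSumSplit (ws : List String) (k : Nat) :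
    ((ws.take k).map String.length).sum + ((ws.drop k).map String.length).sum
      = (ws.map String.length).sum := by
  conv_rhs => rw [← List.take_append_drop k ws]
  simp

theorem pvPointwise (ws : List String) (h : ws ≠ []) (k : Nat) (hk : k < ws.length) :
    pvD ws k = pvDB ws (k : Int) (pvLsum (ws.take (k+1))) := by
  have htne : ws.take (k+1) ≠ [] := by
    cases ws with
    | nil => exact absurd rfl h
    | cons a t => simp [List.take_succ_cons]
  have hlt : (ws.take (k+1)).length = k + 1 := by
    rw [List.length_take]; omega
  have hsum := pvSumSplit ws (k+1)
  rw [pvD, pvDB, pvDBg, pvLenJoin _ htne, pvLsum, pvSumLen, pvLsum, pvSumLen]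
  by_cases hcase : k + 1 < ws.length
  · have hdne : ws.drop (k+1) ≠ [] := by
      intro hcon
      have := congrArg List.length hcon
      simp at this
      omega
    have hdl : (ws.drop (k+1)).length = ws.length - (k+1) := by simp
    rw [pvLenJoin _ hdne, if_pos (by exact_mod_cast (by omega : ((k:Int) + 1 < (ws.length : Int))))]
    congr 1
    rw [hlt, hdl]
    omega
  · have hdeq : ws.drop (k+1) = [] := List.drop_eq_nil_of_le (by omega)
    have htake : ws.take (k+1) = ws := List.take_of_length_le (by omega)
    rw [hdeq, pvJoinEmpty, if_neg (by exact_mod_cast (by omega : ¬ ((k:Int) + 1 < (ws.length : Int))))]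
    rw [hdeq] at hsum
    simp only [List.map_nil, List.sum_nil, Nat.add_zero] at hsum
    congr 1
    rw [hsum, hlt]
    omega

theorem pvListEq (ws : List String) (h : ws ≠ []) :
    (List.range ws.length).map (pvD ws)
      = (List.range ws.length).map (fun k : Nat => pvDB ws (k : Int) (pvLsum (ws.take (k+1)))) := by
  apply List.map_congr_left
  intro k hk
  exact pvPointwise ws h k (List.mem_range.mp hk)

theorem find_even_split_spec : Claim_equal_find_even_split := by
  intro ws _ hpre
  unfold Spec_find_even_split find_even_split find_even_split_alt
  simp only [pvFoldA ws, pvFoldB ws, pvListEq ws hpre]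
  set L := (List.range ws.length).map (fun k : Nat => pvDB ws (k : Int) (pvLsum (ws.take (k+1)))) with hL
  rcases hm : PySem.List.min? L (fun x => x) with _ | m
  · rfl
  · have hmem : m ∈ L := PySem.List.min?_mem hm
    obtain ⟨k0, hk0⟩ := Option.isSome_iff_exists.mp ((PySem.List.index?_isSome_iff L m).mpr hmem)
    obtain ⟨hk0lt, -, -⟩ := PySem.List.getElem_of_index?_eq_some hk0
    have hLlen : L.length = ws.length := by simp [hL]
    simp only [hk0, Option.getD_some]
    have hklt : (k0 : Int) < PySem.List.len ws := by
      rw [PySem.List.len_eq]; exact_mod_cast (hLlen ▸ hk0lt)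
    rw [pvFoldSet _ _ hklt]
    simp [PySem.List.slice_zero_start]
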